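-- pv_equiv track=rewrite | github.com/Yuvakunaal/Python-Practice | problems.py | sublist
-- ===== SOURCE A (Python) =====
-- def sublist(l):
--     dummy = []
--     length = len(l)
--     for i in range(length):
--         for j in range(i,length):
--             sub = l[i:j+1]
--             if sum(sub) == 0:
--                 dummy.append(sub)
--     return dummy
-- ===== SOURCE B (Python) =====
-- def sublist(l):
--     out = []
--     tail = l
--     while tail:
--         s = 0
--         p = []
--         for x in tail:
--             s += x
--             p.append(x)
--             if s == 0:
--                 out.append(p.copy())
--         tail = tail[1:]
--     return out
-- ===== Notes on version B (the rewrite author's own statement) =====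
-- stated objective: faster
-- what changed: B replaces A's triple work (for every pair (i,j) re-summing the slice l[i:j+1]) by a walk over suffixes that maintains a running sum and the growing prefix, copying a sublist only when the running sum hits zero.
import Mathlib
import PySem

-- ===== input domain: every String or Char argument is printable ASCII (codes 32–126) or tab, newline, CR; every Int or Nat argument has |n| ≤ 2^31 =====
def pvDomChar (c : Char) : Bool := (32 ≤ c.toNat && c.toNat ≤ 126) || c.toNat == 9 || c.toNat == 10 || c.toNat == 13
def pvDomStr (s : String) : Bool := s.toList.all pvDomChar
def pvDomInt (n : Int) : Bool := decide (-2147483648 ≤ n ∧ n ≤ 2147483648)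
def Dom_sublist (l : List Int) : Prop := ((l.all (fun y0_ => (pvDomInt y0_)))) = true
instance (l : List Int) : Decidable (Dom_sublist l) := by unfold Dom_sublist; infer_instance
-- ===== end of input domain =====

-- B replaces A's per-pair slice-and-sum by a suffix walk with a running sum (objective: faster, O(n^3) → O(n^2 + output)).

-- ===== PORT A =====
def sublist (l : List Int) : List (List Int) :=
  (PySem.List.pyRange 0 (l.length : Int) 1).foldl (fun dummy i =>
    (PySem.List.pyRange i (l.length : Int) 1).foldl (fun dummy j =>
      let sub := PySem.List.slice l (some i) (some (j + 1))
      if sub.sum = 0 then dummy ++ [sub] else dummy) dummy) []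

-- ===== PORT B =====
-- inner 'for x in tail' body: state (out, s, p); s += x; p.append(x); if s == 0: out.append(p.copy())
def zeroStep (st : List (List Int) × Int × List Int) (x : Int) :
    List (List Int) × Int × List Int :=
  let s := st.2.1 + x
  let p := st.2.2 ++ [x]
  (if s = 0 then st.1 ++ [p] else st.1, s, p)

-- the 'while tail:' loop, out threaded through
def sublistAltGo : List Int → List (List Int) → List (List Int)
  | [], out => out
  | x :: xs, out => sublistAltGo xs ((x :: xs).foldl zeroStep (out, 0, [])).1

def sublist_alt (l : List Int) : List (List Int) := sublistAltGo l []

-- ===== PRECONDITION & SPEC =====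
def Spec_sublist (l : List Int) (out : List (List Int)) : Prop := out = sublist_alt l
instance (l : List Int) (out : List (List Int)) : Decidable (Spec_sublist l out) := by unfold Spec_sublist; infer_instance

-- ===== CLAIM (what is proved, stated in full; the proofs are below) =====
def Claim_equal_sublist : Prop := ∀ (l : List Int), Dom_sublist l → Spec_sublist l (sublist l)

-- ===== LEMMAS AND PROOFS =====

-- canonical form: zero-sum prefixes of each suffix, suffixes in order
def zp (t : List Int) : List (List Int) :=
  (List.range t.length).filterMap (fun k =>
    if (t.take (k + 1)).sum = 0 then some (t.take (k + 1)) else none)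

def canon (l : List Int) : List (List Int) :=
  (List.range l.length).flatMap (fun i => zp (l.drop i))

theorem map_filter_eq_filterMap {α β : Type} (p : α → Prop) [DecidablePred p] (f : α → β)
    (l : List α) :
    (l.filter (fun a => decide (p a))).map f =
      l.filterMap (fun a => if p a then some (f a) else none) := by
  induction l with
  | nil => rfl
  | cons a l ih =>
    by_cases h : p a <;> simp [h, ih]

theorem foldl_zeroStep (t u : List Int) (out : List (List Int)) :
    (t.foldl zeroStep (out, u.sum, u)).1 =
      out ++ (List.range t.length).filterMap (fun k =>
        if (u ++ t.take (k + 1)).sum = 0 then some (u ++ t.take (k + 1)) else none) := by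
  induction t generalizing u out with
  | nil => simp
  | cons x t ih =>
    have hstep : zeroStep (out, u.sum, u) x =
        ((if (u ++ [x]).sum = 0 then out ++ [u ++ [x]] else out), (u ++ [x]).sum, u ++ [x]) := by
      simp [zeroStep]
    rw [List.foldl_cons, hstep, ih (u ++ [x])]
    have hxu : ∀ (y : List Int), (u ++ [x]) ++ y = u ++ x :: y := fun y => by simp
    simp only [List.length_cons, List.range_succ_eq_map, List.filterMap_cons,
      List.filterMap_map, List.take_succ_cons, Function.comp, List.take_zero,
      hxu]
    split_ifs with h
    · simp
    · simp

theorem zeroPrefixes_eq (t : List Int) (out : List (List Int)) :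
    (t.foldl zeroStep (out, 0, [])).1 = out ++ zp t := by
  have := foldl_zeroStep t [] out
  simpa [zp] using this

theorem sublistAltGo_eq (t : List Int) (out : List (List Int)) :
    sublistAltGo t out = out ++ canon t := by
  induction t generalizing out with
  | nil => simp [sublistAltGo, canon]
  | cons x xs ih =>
    rw [sublistAltGo, zeroPrefixes_eq, ih]
    unfold canon
    simp only [List.length_cons, List.range_succ_eq_map]
    simp [List.flatMap_cons, List.flatMap_map]

theorem alt_eq_canon (l : List Int) : sublist_alt l = canon l := by
  simpa [sublist_alt] using sublistAltGo_eq l []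

theorem inner_eq_zp (l : List Int) (i : ℕ) (dummy : List (List Int)) :
    ((PySem.List.pyRange (i : Int) (l.length : Int) 1).foldl (fun dummy j =>
      let sub := PySem.List.slice l (some (i : Int)) (some (j + 1))
      if sub.sum = 0 then dummy ++ [sub] else dummy) dummy) =
      dummy ++ zp (l.drop i) := by
  simp only []
  rw [PySem.List.foldl_append_ite
      (p := fun j => (PySem.List.slice l (some (i:Int)) (some (j+1))).sum = 0)
      (f := fun j => PySem.List.slice l (some (i:Int)) (some (j+1)))]
  congr 1
  rw [PySem.List.pyRange_one,
      map_filter_eq_filterMap (fun j => (PySem.List.slice l (some (i:Int)) (some (j+1))).sum = 0)]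
  rw [List.filterMap_map]
  have hn : (((l.length : Int)) - (i : Int)).toNat = l.length - i := by omega
  rw [hn]
  unfold zp
  rw [List.length_drop]
  refine List.filterMap_congr ?_
  intro k _
  have hs : PySem.List.slice l (some (i : Int)) (some ((i : Int) + (k : Int) + 1))
      = (l.drop i).take (k + 1) := by
    have h := PySem.List.slice_natCast_add l i (k + 1)
    push_cast at h ⊢
    rw [← add_assoc] at h
    exact h
  simp only [Function.comp]
  rw [hs]

theorem a_eq_canon (l : List Int) : sublist l = canon l := by
  unfold sublist canon
  rw [PySem.List.pyRange_one]
  have h0 : ((l.length : Int) - 0).toNat = l.length := by omega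
  rw [h0, List.foldl_map]
  simp only [zero_add]
  generalize List.range l.length = ks
  induction ks using List.reverseRecOn with
  | nil => simp
  | append_singleton ks k ih =>
    rw [List.foldl_append, List.flatMap_append, ih, List.foldl_cons, List.foldl_nil,
        inner_eq_zp l k]
    simp

theorem sublist_spec : Claim_equal_sublist := by
  intro l _
  unfold Spec_sublist
  rw [a_eq_canon, alt_eq_canon]
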